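-- pv_equiv track=rewrite | github.com/j-rewerts/practice-problems | daily-coding/121/jared.py | findMinMoves
-- ===== SOURCE A (Python) =====
-- def findMinMoves(a, b, word):
--   options = []
--   aIn = a
--   bIn = b
--   # This loops moves through a
--   while aIn < bIn:
--     bIn = b
--     # This loops moves through b
--     while aIn < bIn:
--       if word[aIn] == word[bIn]:
--         options.append((aIn-a, b-bIn))
--       bIn -= 1
--     aIn +=1
--   # We've now generated all possible solutions. We must search them.
--   best = (b-a, 0)
--   for a, b in options:
--     if a + b <= best[0] + best[1]:
--       best = (a, b)
--
--   return best
-- ===== SOURCE B (Python) =====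
-- def findMinMoves(a, b, word):
--   # Single backward scan: the first j (from b down) with word[j] == word[a]
--   # gives the minimal-offset option (0, b-j); otherwise no option exists.
--   j = b
--   while j > a:
--     if word[j] == word[a]:
--       return (0, b - j)
--     j -= 1
--   return (b - a, 0)
-- ===== Notes on version B (the rewrite author's own statement) =====
-- stated objective: simpler
-- what changed: Instead of generating an options list with nested while-loops and then folding over it to pick the best, B does one backward scan from b and returns at the first index j with word[j]==word[a] (A's outer loop in fact runs only once, so this first match is exactly A's result).
import Mathlib
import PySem

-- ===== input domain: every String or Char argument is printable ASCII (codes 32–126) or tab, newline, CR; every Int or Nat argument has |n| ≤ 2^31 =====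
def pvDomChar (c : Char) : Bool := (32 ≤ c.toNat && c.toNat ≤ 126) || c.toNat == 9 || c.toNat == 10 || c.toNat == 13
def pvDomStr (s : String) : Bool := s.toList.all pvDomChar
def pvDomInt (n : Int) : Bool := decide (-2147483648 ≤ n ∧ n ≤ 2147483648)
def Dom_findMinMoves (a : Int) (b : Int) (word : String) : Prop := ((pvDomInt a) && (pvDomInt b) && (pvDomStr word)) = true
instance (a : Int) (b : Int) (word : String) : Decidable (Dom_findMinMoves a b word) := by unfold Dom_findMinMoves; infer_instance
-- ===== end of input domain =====

-- B replaces A's nested option-generating loops + best-selection fold by a single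
-- backward scan returning at the first match (objective: simpler).

-- ===== PORT A =====
-- inner loop of A: bIn counts down from its start while aIn < bIn, appending matches
def pvInnerA (word : String) (a b aIn : Int) (bIn : Int) (opts : List (Int × Int)) :
    List (Int × Int) × Int :=
  if h : aIn < bIn then
    let opts' := if PySem.Str.pyGet? word aIn == PySem.Str.pyGet? word bIn
      then opts ++ [(aIn - a, b - bIn)] else opts
    pvInnerA word a b aIn (bIn - 1) opts'
  else (opts, bIn)
termination_by (bIn - aIn).toNat
decreasing_by omega

-- outer loop of A (fuel makes the recursion total; large enough for every admitted input)
def pvOuterA (word : String) (a b : Int) : Nat → Int → Int → List (Int × Int) → List (Int × Int)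
  | 0, _, _, opts => opts
  | fuel + 1, aIn, bIn, opts =>
    if aIn < bIn then
      let r := pvInnerA word a b aIn b opts
      pvOuterA word a b fuel (aIn + 1) r.2 r.1
    else opts

def findMinMoves (a : Int) (b : Int) (word : String) : Int × Int :=
  let options := pvOuterA word a b ((b - a).toNat + 1) a b []
  options.foldl (fun best p => if p.1 + p.2 ≤ best.1 + best.2 then p else best) (b - a, 0)

-- ===== PORT B =====
def pvScanB (word : String) (a b : Int) (j : Int) : Int × Int :=
  if h : a < j then
    if PySem.Str.pyGet? word j == PySem.Str.pyGet? word a then (0, b - j)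
    else pvScanB word a b (j - 1)
  else (b - a, 0)
termination_by (j - a).toNat
decreasing_by omega

def findMinMoves_alt (a : Int) (b : Int) (word : String) : Int × Int :=
  pvScanB word a b b

-- ===== PRECONDITION & SPEC =====
-- Pre_ excludes exactly the inputs where Python A raises IndexError: when a < b the
-- indices a and (a, b] must be in Python's index range [-len, len).
def Pre_findMinMoves (a : Int) (b : Int) (word : String) : Prop :=
  a < b → (-(word.toList.length : Int) ≤ a ∧ b < (word.toList.length : Int))
instance (a : Int) (b : Int) (word : String) : Decidable (Pre_findMinMoves a b word) := by
  unfold Pre_findMinMoves; infer_instance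
def pvWitness_findMinMoves : Int × Int × String := (0, 3, "abca")
def Spec_findMinMoves (a : Int) (b : Int) (word : String) (out : Int × Int) : Prop := out = findMinMoves_alt a b word
instance (a : Int) (b : Int) (word : String) (out : Int × Int) : Decidable (Spec_findMinMoves a b word out) := by unfold Spec_findMinMoves; infer_instance

-- ===== CLAIM (what is proved, stated in full; the proofs are below) =====
def Claim_equal_findMinMoves : Prop := ∀ (a : Int) (b : Int) (word : String), Dom_findMinMoves a b word → Pre_findMinMoves a b word → Spec_findMinMoves a b word (findMinMoves a b word)

-- ===== LEMMAS AND PROOFS =====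

-- the pure list of options A generates (aIn = a throughout): matches of word[a]
-- against word[j], j descending from the start value down to a+1
def pvGen (word : String) (a b : Int) (j : Int) : List (Int × Int) :=
  if h : a < j then
    (if PySem.Str.pyGet? word a == PySem.Str.pyGet? word j then [(a - a, b - j)] else [])
      ++ pvGen word a b (j - 1)
  else []
termination_by (j - a).toNat
decreasing_by omega

lemma pvInnerA_eq (word : String) (a b : Int) : ∀ (j : Int) (opts : List (Int × Int)),
    pvInnerA word a b a j opts = (opts ++ pvGen word a b j, if a < j then a else j) := by
  intro j opts
  induction hn : (j - a).toNat using Nat.strong_induction_on generalizing j opts with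
  | _ n ih =>
    unfold pvInnerA pvGen
    by_cases h : a < j
    · simp only [h, dif_pos]
      rw [ih ((j - 1 - a).toNat) (by omega) _ _ rfl]
      by_cases hj : a < j - 1
      · simp [hj]; split <;> simp
      · have : j - 1 = a := by omega
        simp [this]; split <;> simp
    · simp [h]

lemma pvFold_stay (word : String) (a b : Int) : ∀ (j : Int) (best : Int × Int),
    best.1 + best.2 < b - j →
    (pvGen word a b j).foldl (fun best p => if p.1 + p.2 ≤ best.1 + best.2 then p else best) best
      = best := by
  intro j best hb
  induction hn : (j - a).toNat using Nat.strong_induction_on generalizing j best with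
  | _ n ih =>
    unfold pvGen
    by_cases h : a < j
    · simp only [h, dif_pos]
      by_cases hm : PySem.Str.pyGet? word a == PySem.Str.pyGet? word j
      · simp only [hm, if_pos, List.cons_append, List.nil_append, List.foldl_cons]
        have : ¬ ((a - a) + (b - j) ≤ best.1 + best.2) := by omega
        rw [if_neg this]
        exact ih ((j - 1 - a).toNat) (by omega) _ _ (by omega) rfl
      · simp only [hm]
        exact ih ((j - 1 - a).toNat) (by omega) _ _ (by omega) rfl
    · simp [h]

lemma pvFold_eq_scan (word : String) (a b : Int) : ∀ (j : Int),
    (pvGen word a b j).foldl (fun best p => if p.1 + p.2 ≤ best.1 + best.2 then p else best)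
      (b - a, 0) = pvScanB word a b j := by
  intro j
  induction hn : (j - a).toNat using Nat.strong_induction_on generalizing j with
  | _ n ih =>
    unfold pvGen pvScanB
    by_cases h : a < j
    · simp only [h, dif_pos]
      by_cases hm : PySem.Str.pyGet? word a = PySem.Str.pyGet? word j
      · have hb1 : (PySem.Str.pyGet? word a == PySem.Str.pyGet? word j) = true := beq_iff_eq.2 hm
        have hb2 : (PySem.Str.pyGet? word j == PySem.Str.pyGet? word a) = true :=
          beq_iff_eq.2 hm.symm
        simp only [hb1, if_pos, hb2, List.cons_append, List.nil_append, List.foldl_cons]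
        rw [if_pos (by omega)]
        rw [pvFold_stay word a b (j - 1) _ (by simp)]
        simp
      · have hb1 : (PySem.Str.pyGet? word a == PySem.Str.pyGet? word j) = false :=
          beq_eq_false_iff_ne.2 hm
        have hb2 : (PySem.Str.pyGet? word j == PySem.Str.pyGet? word a) = false :=
          beq_eq_false_iff_ne.2 (Ne.symm hm)
        simp only [hb1, hb2, Bool.false_eq_true]
        exact ih ((j - 1 - a).toNat) (by omega) _ rfl
    · simp [h]

-- ===== VERDICT (by name: the statement is the Claim_ definition above) =====
theorem findMinMoves_spec : Claim_equal_findMinMoves := by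
  intro a b word _ _
  unfold Spec_findMinMoves findMinMoves findMinMoves_alt
  by_cases h : a < b
  · obtain ⟨m, hm⟩ : ∃ m, (b - a).toNat = m + 1 := ⟨(b - a).toNat - 1, by omega⟩
    rw [hm]
    unfold pvOuterA
    rw [if_pos h, pvInnerA_eq word a b b []]
    simp only [if_pos h, List.nil_append]
    unfold pvOuterA
    rw [if_neg (by omega)]
    exact pvFold_eq_scan word a b b
  · unfold pvOuterA
    rw [if_neg h]
    unfold pvScanB
    rw [dif_neg h]
    simp
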